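-- pv_equiv track=rewrite | github.com/jinlibao/toolkits | Project.Euler/Answers.Python/53.py | factorialSeries
-- ===== SOURCE A (Python) =====
-- def factorialSeries(n):
-- 	fSeries = []
-- 	for i in range(n):
-- 		if i == 0:
-- 			fSeries.append(1)
-- 		else:
-- 			value = fSeries[i-1] * i
-- 			fSeries.append(value)
-- 	return fSeries
-- ===== SOURCE B (Python) =====
-- import math
--
-- def factorialSeries(n):
--     return [math.factorial(i) for i in range(n)]
-- ===== Notes on version B (the rewrite author's own statement) =====
-- stated objective: idiomatic
-- what changed: Replaces the running-product accumulator loop, with its special-cased first iteration and back-reference to the previously appended element, by a single comprehension computing each factorial independently via math.factorial.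
import Mathlib
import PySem

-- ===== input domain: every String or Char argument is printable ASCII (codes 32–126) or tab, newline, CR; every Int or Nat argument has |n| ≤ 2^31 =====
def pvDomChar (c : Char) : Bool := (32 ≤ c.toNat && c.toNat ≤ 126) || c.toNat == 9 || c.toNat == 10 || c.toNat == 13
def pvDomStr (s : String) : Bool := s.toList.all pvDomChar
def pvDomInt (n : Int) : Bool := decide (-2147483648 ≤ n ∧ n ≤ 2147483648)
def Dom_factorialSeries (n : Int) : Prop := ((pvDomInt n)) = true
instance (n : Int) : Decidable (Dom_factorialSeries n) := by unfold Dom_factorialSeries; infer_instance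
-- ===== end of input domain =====

-- B replaces A's running-product loop (with i==0 special case and fSeries[i-1] back-reference)
-- by a comprehension computing each factorial independently (idiomatic; not faster).


-- ===== PORT A =====
-- loop body: fSeries[i-1] is always in range when the else branch runs, so pyGetD is exact here
def factorialSeries (n : Int) : List Int :=
  (PySem.List.pyRange 0 n 1).foldl
    (fun fSeries i =>
      if i == 0 then fSeries ++ [1]
      else fSeries ++ [PySem.List.pyGetD fSeries (i - 1) 0 * i])
    []

-- ===== PORT B =====
-- math.factorial(i) ported as Nat.factorial on the (nonnegative) loop index
def factorialSeries_alt (n : Int) : List Int :=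
  (PySem.List.pyRange 0 n 1).map (fun i => (Nat.factorial i.toNat : Int))

-- ===== PRECONDITION & SPEC =====
def Spec_factorialSeries (n : Int) (out : List Int) : Prop := out = factorialSeries_alt n
instance (n : Int) (out : List Int) : Decidable (Spec_factorialSeries n out) := by unfold Spec_factorialSeries; infer_instance

-- ===== CLAIM (what is proved, stated in full; the proofs are below) =====
def Claim_equal_factorialSeries : Prop := ∀ (n : Int), Dom_factorialSeries n → Spec_factorialSeries n (factorialSeries n)

-- ===== LEMMAS AND PROOFS =====

theorem factorialSeries_nat (k : Nat) :
    factorialSeries (k : Int) = factorialSeries_alt (k : Int) := by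
  induction k with
  | zero => decide
  | succ m ih =>
    unfold factorialSeries factorialSeries_alt at *
    rw [show ((m + 1 : Nat) : Int) = (m : Int) + 1 by push_cast; ring,
        PySem.List.pyRange_one_succ_right (by positivity)]
    rw [List.foldl_append, List.map_append, ih]
    simp only [List.foldl_cons, List.foldl_nil, List.map_cons, List.map_nil]
    by_cases hm : m = 0
    · subst hm; decide
    · have h0 : ((m : Int) == 0) = false := by
        simp [hm]
      rw [h0]
      simp only [Bool.false_eq_true, if_false, List.append_cancel_left_eq, List.cons.injEq,
        and_true]
      have hc : (m : Int) - 1 = ((m - 1 : Nat) : Int) := by omega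
      rw [hc, PySem.List.pyGetD_map_pyRange _ m (m - 1) 0 (by omega)]
      have : ((m - 1 : Nat) : Int).toNat = m - 1 := by omega
      rw [this]
      have : (m : Int).toNat = m := by omega
      rw [this]
      obtain ⟨p, rfl⟩ : ∃ p, m = p + 1 := ⟨m - 1, by omega⟩
      simp [Nat.factorial_succ]
      ring

theorem pyRange_nonpos (n : Int) (h : n ≤ 0) : PySem.List.pyRange 0 n 1 = [] := by
  have : (PySem.List.pyRange 0 n 1).length = 0 := by
    rw [PySem.List.length_pyRange_one]; omega
  exact List.eq_nil_of_length_eq_zero this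

-- ===== VERDICT (by name: the statement is the Claim_ definition above) =====
theorem factorialSeries_spec : Claim_equal_factorialSeries := by
  intro n _
  unfold Spec_factorialSeries
  by_cases h : n ≤ 0
  · unfold factorialSeries factorialSeries_alt
    rw [pyRange_nonpos n h]; rfl
  · have : n = ((n.toNat : Nat) : Int) := by omega
    rw [this]; exact factorialSeries_nat n.toNat
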